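-- pv_equiv track=rewrite | github.com/Manikanthanb/Lipi-Nlp | Candasu/website/p.py | chandassuCondition
-- ===== SOURCE A (Python) =====
-- def chandassuCondition(lg_list,syllable1,syllable2,pattern1,pattern2,extraGuru,tsfk):
-- 	if pattern1 != "" and pattern2 != "":
-- 		count=0
-- 		pattern=[]
-- 		stringPattern=""
-- 		len1=len(lg_list)
-- 		i=0
-- 		while i<len1 :
-- 			t3f4=True
-- 			len2=len(lg_list[i])
-- 			if i==2 or i==5 :
-- 				if extraGuru == True :
-- 					len2=len2-1
-- 			j=0
-- 			while j<len2 :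
-- 				pattern.append(lg_list[i][j])
-- 				stringPattern = stringPattern + str(lg_list[i][j])
-- 				if tsfk == True :
-- 					if t3f4 == True :
-- 						if sum(pattern) == syllable1 :
-- 							if syllable1 == syllable2 :
-- 								if stringPattern == pattern1 or stringPattern == pattern2 :
-- 									return False
-- 							t3f4=False
-- 							pattern=[]
-- 							stringPattern=""
-- 					elif sum(pattern) == syllable2 :
-- 						if stringPattern == pattern1 or stringPattern == pattern2 :
-- 							return False
-- 						t3f4=True
-- 						pattern=[]
-- 						stringPattern=""
-- 				elif sum(pattern) == syllable1 or sum(pattern) == syllable2 :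
-- 					count=count+1
-- 					if ( count == 6 or count == 14 ) and (stringPattern != "1111" and stringPattern != "121") :
-- 						return False
-- 					if ( count == 8 or count == 16 ) and (stringPattern != "22" and stringPattern != "112") :
-- 						return False
-- 					if ((count%2) != 0) and (stringPattern == pattern1) or ((count%2) != 0) and (stringPattern == pattern2) :
-- 						return False
-- 					pattern=[]
-- 					stringPattern=""
-- 				j=j+1
-- 			i=i+1
-- 	return True
-- ===== SOURCE B (Python) =====
-- def chandassuCondition(lg_list, syllable1, syllable2, pattern1, pattern2, extraGuru, tsfk):
--     # B: staged pipeline — flatten the chunks, CUT the stream into the list of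
--     # closed segments (pure data, no checks), then validate the segments with any().
--     if pattern1 == "" or pattern2 == "":
--         return True
--     flat = []
--     for i, chunk in enumerate(lg_list):
--         part = chunk[:-1] if (extraGuru and i in (2, 5)) else chunk
--         flat.extend((v, j == 0) for j, v in enumerate(part))
--     if tsfk:
--         segs = []
--         total, sp, phase = 0, "", 1
--         for v, start in flat:
--             if start:
--                 phase = 1
--             total += v
--             sp += str(v)
--             if phase == 1 and total == syllable1:
--                 segs.append((sp, 1))
--                 total, sp, phase = 0, "", 2
--             elif phase == 2 and total == syllable2:
--                 segs.append((sp, 2))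
--                 total, sp, phase = 0, "", 1
--         return not any(
--             (ph == 2 or syllable1 == syllable2) and sp in (pattern1, pattern2)
--             for sp, ph in segs)
--     else:
--         segs = []
--         total, sp = 0, ""
--         for v, _ in flat:
--             total += v
--             sp += str(v)
--             if total == syllable1 or total == syllable2:
--                 segs.append(sp)
--                 total, sp = 0, ""
--         return not any(
--             (c in (6, 14) and sp not in ("1111", "121"))
--             or (c in (8, 16) and sp not in ("22", "112"))
--             or (c % 2 == 1 and sp in (pattern1, pattern2))
--             for c, sp in enumerate(segs, 1))
-- ===== Notes on version B (the rewrite author's own statement) =====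
-- stated objective: faster
-- what changed: B replaces A's nested while loops with interleaved checks and early returns by a staged pipeline: flatten the chunks (truncating chunks 2 and 5 under extraGuru), cut the flat stream into the complete list of closed segments as pure data (with a running integer sum instead of re-summing a list), and finally validate that segment list declaratively with a single any() over the forbidden-segment predicate.
import Mathlib
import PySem

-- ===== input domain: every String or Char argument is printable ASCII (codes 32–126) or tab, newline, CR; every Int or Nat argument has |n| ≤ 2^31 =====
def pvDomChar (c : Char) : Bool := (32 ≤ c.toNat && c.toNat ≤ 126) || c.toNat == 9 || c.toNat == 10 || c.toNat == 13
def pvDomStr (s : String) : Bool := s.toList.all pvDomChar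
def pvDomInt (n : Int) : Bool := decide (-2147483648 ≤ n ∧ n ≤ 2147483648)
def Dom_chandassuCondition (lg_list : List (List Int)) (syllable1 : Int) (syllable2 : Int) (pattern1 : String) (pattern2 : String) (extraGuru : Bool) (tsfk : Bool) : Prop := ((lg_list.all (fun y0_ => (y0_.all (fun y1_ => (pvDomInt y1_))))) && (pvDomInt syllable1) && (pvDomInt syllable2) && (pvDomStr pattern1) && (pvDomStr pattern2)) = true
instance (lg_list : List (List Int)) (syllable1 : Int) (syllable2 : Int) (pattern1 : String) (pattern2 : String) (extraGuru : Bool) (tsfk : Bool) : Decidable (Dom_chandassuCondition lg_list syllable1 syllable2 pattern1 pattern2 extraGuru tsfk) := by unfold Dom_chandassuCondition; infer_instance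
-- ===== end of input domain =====

-- B restructures A's interleaved nested loops into a staged pipeline: flatten the
-- chunks, CUT the stream into the list of closed segments (pure data, no checks),
-- then validate that segment list declaratively with any().  (Return value only.)

-- ===== PORT A =====
-- inner while loop over the (already truncated) row elements; none = `return False`
def chandA_inner (s1 s2 : Int) (p1 p2 : String) (tsfk : Bool) :
    List Int → Int → List Int → String → Bool → Option (Int × List Int × String × Bool)
  | [], count, pattern, sp, t3f4 => some (count, pattern, sp, t3f4)
  | v :: rest, count, pattern, sp, t3f4 =>
    let pattern := pattern ++ [v]
    let sp := sp ++ PySem.Int.toStr v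
    if tsfk then
      if t3f4 then
        if pattern.sum = s1 then
          if s1 = s2 ∧ (sp = p1 ∨ sp = p2) then none
          else chandA_inner s1 s2 p1 p2 tsfk rest count [] "" false
        else chandA_inner s1 s2 p1 p2 tsfk rest count pattern sp t3f4
      else if pattern.sum = s2 then
        if sp = p1 ∨ sp = p2 then none
        else chandA_inner s1 s2 p1 p2 tsfk rest count [] "" true
      else chandA_inner s1 s2 p1 p2 tsfk rest count pattern sp t3f4
    else if pattern.sum = s1 ∨ pattern.sum = s2 then
      let count := count + 1
      if (count = 6 ∨ count = 14) ∧ (sp ≠ "1111" ∧ sp ≠ "121") then none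
      else if (count = 8 ∨ count = 16) ∧ (sp ≠ "22" ∧ sp ≠ "112") then none
      else if count % 2 ≠ 0 ∧ (sp = p1 ∨ sp = p2) then none
      else chandA_inner s1 s2 p1 p2 tsfk rest count [] "" t3f4
    else chandA_inner s1 s2 p1 p2 tsfk rest count pattern sp t3f4

-- outer while loop over lg_list with index i; len2 as in A (may be -1, then no element is taken)
def chandA_outer (s1 s2 : Int) (p1 p2 : String) (extraGuru tsfk : Bool) :
    List (List Int) → Nat → Int → List Int → String → Bool
  | [], _, _, _, _ => true
  | row :: rows, i, count, pattern, sp =>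
    let len2 : Int := if (i = 2 ∨ i = 5) ∧ extraGuru then (row.length : Int) - 1 else (row.length : Int)
    match chandA_inner s1 s2 p1 p2 tsfk (row.take len2.toNat) count pattern sp true with
    | none => false
    | some (count, pattern, sp, _) =>
        chandA_outer s1 s2 p1 p2 extraGuru tsfk rows (i + 1) count pattern sp

def chandassuCondition (lg_list : List (List Int)) (syllable1 : Int) (syllable2 : Int) (pattern1 : String) (pattern2 : String) (extraGuru : Bool) (tsfk : Bool) : Bool :=
  if pattern1 ≠ "" ∧ pattern2 ≠ "" then
    chandA_outer syllable1 syllable2 pattern1 pattern2 extraGuru tsfk lg_list 0 0 [] ""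
  else true

-- ===== PORT B =====
-- stage 1: flatten, marking each chunk's first element (j == 0)
def chandB_mark : List Int → List (Int × Bool)
  | [] => []
  | v :: vs => (v, true) :: vs.map (fun w => (w, false))

def chandB_flat (extraGuru : Bool) : List (List Int) → Nat → List (Int × Bool)
  | [], _ => []
  | row :: rows, i =>
    let part := if extraGuru ∧ (i = 2 ∨ i = 5) then row.dropLast else row
    chandB_mark part ++ chandB_flat extraGuru rows (i + 1)

-- stage 2 (tsfk): cut the stream into closed segments tagged with their phase (1 or 2)
def chandB_splitT (s1 s2 : Int) : List (Int × Bool) → Int → String → Int → List (String × Int)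
  | [], _, _, _ => []
  | (v, start) :: rest, total, sp, phase =>
    let phase := if start then 1 else phase
    let total := total + v
    let sp := sp ++ PySem.Int.toStr v
    if phase = 1 ∧ total = s1 then (sp, 1) :: chandB_splitT s1 s2 rest 0 "" 2
    else if phase = 2 ∧ total = s2 then (sp, 2) :: chandB_splitT s1 s2 rest 0 "" 1
    else chandB_splitT s1 s2 rest total sp phase

-- stage 2 (not tsfk): cut the stream into closed segments (chunk marks unused)
def chandB_splitF (s1 s2 : Int) : List (Int × Bool) → Int → String → List String
  | [], _, _ => []
  | (v, _) :: rest, total, sp =>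
    let total := total + v
    let sp := sp ++ PySem.Int.toStr v
    if total = s1 ∨ total = s2 then sp :: chandB_splitF s1 s2 rest 0 ""
    else chandB_splitF s1 s2 rest total sp

-- enumerate(segs, 1)
def chandB_enum1 : List String → Int → List (Int × String)
  | [], _ => []
  | sp :: rest, c => (c, sp) :: chandB_enum1 rest (c + 1)

def chandassuCondition_alt (lg_list : List (List Int)) (syllable1 : Int) (syllable2 : Int) (pattern1 : String) (pattern2 : String) (extraGuru : Bool) (tsfk : Bool) : Bool :=
  if pattern1 = "" ∨ pattern2 = "" then true
  else
    let flat := chandB_flat extraGuru lg_list 0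
    if tsfk then
      !((chandB_splitT syllable1 syllable2 flat 0 "" 1).any
          (fun q => decide ((q.2 = 2 ∨ syllable1 = syllable2) ∧ (q.1 = pattern1 ∨ q.1 = pattern2))))
    else
      !((chandB_enum1 (chandB_splitF syllable1 syllable2 flat 0 "") 1).any
          (fun q => decide (((q.1 = 6 ∨ q.1 = 14) ∧ ¬(q.2 = "1111" ∨ q.2 = "121")) ∨
                            ((q.1 = 8 ∨ q.1 = 16) ∧ ¬(q.2 = "22" ∨ q.2 = "112")) ∨
                            (q.1 % 2 = 1 ∧ (q.2 = pattern1 ∨ q.2 = pattern2)))))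

-- ===== PRECONDITION & SPEC =====
def Spec_chandassuCondition (lg_list : List (List Int)) (syllable1 : Int) (syllable2 : Int) (pattern1 : String) (pattern2 : String) (extraGuru : Bool) (tsfk : Bool) (out : Bool) : Prop := out = chandassuCondition_alt lg_list syllable1 syllable2 pattern1 pattern2 extraGuru tsfk
instance (lg_list : List (List Int)) (syllable1 : Int) (syllable2 : Int) (pattern1 : String) (pattern2 : String) (extraGuru : Bool) (tsfk : Bool) (out : Bool) : Decidable (Spec_chandassuCondition lg_list syllable1 syllable2 pattern1 pattern2 extraGuru tsfk out) := by unfold Spec_chandassuCondition; infer_instance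

-- ===== CLAIM (what is proved, stated in full; the proofs are below) =====
def Claim_equal_chandassuCondition : Prop := ∀ (lg_list : List (List Int)) (syllable1 : Int) (syllable2 : Int) (pattern1 : String) (pattern2 : String) (extraGuru : Bool) (tsfk : Bool), Dom_chandassuCondition lg_list syllable1 syllable2 pattern1 pattern2 extraGuru tsfk → Spec_chandassuCondition lg_list syllable1 syllable2 pattern1 pattern2 extraGuru tsfk (chandassuCondition lg_list syllable1 syllable2 pattern1 pattern2 extraGuru tsfk)

-- ===== LEMMAS AND PROOFS =====

-- proof-only intermediate form: a single loop over the flat stream with a running sum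
def chandB_loop (s1 s2 : Int) (p1 p2 : String) (tsfk : Bool) :
    List (Int × Bool) → Int → String → Int → Bool → Bool
  | [], _, _, _, _ => true
  | (v, start) :: rest, total, sp, count, t3f4 =>
    let t3f4 := if start then true else t3f4
    let total := total + v
    let sp := sp ++ PySem.Int.toStr v
    if tsfk then
      if t3f4 then
        if total = s1 then
          if s1 = s2 ∧ (sp = p1 ∨ sp = p2) then false
          else chandB_loop s1 s2 p1 p2 tsfk rest 0 "" count false
        else chandB_loop s1 s2 p1 p2 tsfk rest total sp count t3f4
      else if total = s2 then
        if sp = p1 ∨ sp = p2 then false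
        else chandB_loop s1 s2 p1 p2 tsfk rest 0 "" count true
      else chandB_loop s1 s2 p1 p2 tsfk rest total sp count t3f4
    else if total = s1 ∨ total = s2 then
      let count := count + 1
      if (count = 6 ∨ count = 14) ∧ (sp ≠ "1111" ∧ sp ≠ "121") then false
      else if (count = 8 ∨ count = 16) ∧ (sp ≠ "22" ∧ sp ≠ "112") then false
      else if count % 2 ≠ 0 ∧ (sp = p1 ∨ sp = p2) then false
      else chandB_loop s1 s2 p1 p2 tsfk rest 0 "" count t3f4
    else chandB_loop s1 s2 p1 p2 tsfk rest total sp count t3f4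

-- the flat loop on unmarked elements simulates A's inner loop (running sum = pattern.sum)
theorem chandB_loop_inner (s1 s2 : Int) (p1 p2 : String) (tsfk : Bool)
    (elts : List Int) (rest : List (Int × Bool)) (count : Int) (pattern : List Int)
    (sp : String) (t3f4 : Bool) :
    chandB_loop s1 s2 p1 p2 tsfk (elts.map (fun w => (w, false)) ++ rest) pattern.sum sp count t3f4 =
      match chandA_inner s1 s2 p1 p2 tsfk elts count pattern sp t3f4 with
      | none => false
      | some (c, pa, s, t) => chandB_loop s1 s2 p1 p2 tsfk rest pa.sum s c t := by
  induction elts generalizing rest count pattern sp t3f4 with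
  | nil => simp [chandA_inner]
  | cons v vs ih =>
    have hsum : (pattern ++ [v]).sum = pattern.sum + v := by simp
    simp only [List.map_cons, List.cons_append, chandB_loop, chandA_inner, hsum,
      Bool.false_eq_true, if_false]
    split_ifs <;>
      first
        | rfl
        | exact ih rest count ([] : List Int) "" false
        | exact ih rest count ([] : List Int) "" true
        | exact ih rest (count + 1) ([] : List Int) "" t3f4
        | (have h := ih rest count (pattern ++ [v]) (sp ++ PySem.Int.toStr v) t3f4;
           rw [hsum] at h; exact h)

-- marking the first element forces t3f4 := true, as A's per-row reset does
theorem chandB_loop_mark (s1 s2 : Int) (p1 p2 : String) (tsfk : Bool)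
    (elts : List Int) (rest : List (Int × Bool)) (total : Int) (sp : String)
    (count : Int) (t3f4 : Bool) :
    chandB_loop s1 s2 p1 p2 tsfk (chandB_mark elts ++ rest) total sp count t3f4 =
      chandB_loop s1 s2 p1 p2 tsfk (elts.map (fun w => (w, false)) ++ rest) total sp count
        (if elts = [] then t3f4 else true) := by
  cases elts with
  | nil => simp [chandB_mark]
  | cons v vs => simp [chandB_mark, chandB_loop]

-- outer loop simulation: A equals the flat loop
theorem chandB_flat_outer (s1 s2 : Int) (p1 p2 : String) (extraGuru tsfk : Bool)
    (rows : List (List Int)) (i : Nat) (count : Int) (pattern : List Int) (sp : String)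
    (t3f4 : Bool) :
    chandB_loop s1 s2 p1 p2 tsfk (chandB_flat extraGuru rows i) pattern.sum sp count t3f4 =
      chandA_outer s1 s2 p1 p2 extraGuru tsfk rows i count pattern sp := by
  induction rows generalizing i count pattern sp t3f4 with
  | nil => simp [chandB_flat, chandB_loop, chandA_outer]
  | cons row rows ih =>
    have hpart :
        (if extraGuru ∧ (i = 2 ∨ i = 5) then row.dropLast else row) =
          row.take (if (i = 2 ∨ i = 5) ∧ extraGuru then ((row.length : Int) - 1) else (row.length : Int)).toNat := by
      by_cases h : extraGuru ∧ (i = 2 ∨ i = 5)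
      · have : ((row.length : Int) - 1).toNat = row.length - 1 := by omega
        simp [h, this, List.dropLast_eq_take]
      · rcases Decidable.not_and_iff_not_or_not.mp h with h' | h'
        · by_cases h2 : (i = 2 ∨ i = 5) <;> simp [h', h2]
        · simp [h']
    simp only [chandB_flat, chandA_outer, hpart]
    rw [chandB_loop_mark, chandB_loop_inner]
    set elts := List.take (if (i = 2 ∨ i = 5) ∧ extraGuru then ((row.length : Int) - 1) else (row.length : Int)).toNat row with helts
    by_cases he : elts = []
    · simp only [he, if_true]
      simp only [chandA_inner]
      exact ih (i + 1) count pattern sp t3f4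
    · simp only [if_neg he]
      cases hA : chandA_inner s1 s2 p1 p2 tsfk elts count pattern sp true with
      | none => rfl
      | some st =>
        obtain ⟨c, pa, s, t⟩ := st
        exact ih (i + 1) c pa s t

-- the flat loop (tsfk) equals split-then-validate
theorem chandB_loop_splitT (s1 s2 : Int) (p1 p2 : String)
    (flat : List (Int × Bool)) (total : Int) (sp : String) (count : Int) (t3f4 : Bool) :
    chandB_loop s1 s2 p1 p2 true flat total sp count t3f4 =
      !((chandB_splitT s1 s2 flat total sp (if t3f4 then 1 else 2)).any
          (fun q => decide ((q.2 = 2 ∨ s1 = s2) ∧ (q.1 = p1 ∨ q.1 = p2)))) := by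
  induction flat generalizing total sp count t3f4 with
  | nil => cases t3f4 <;> rfl
  | cons x rest ih =>
    obtain ⟨v, start⟩ := x
    by_cases hb : (if start then true else t3f4) = true
    · have hp : (if start then (1 : Int) else if t3f4 then 1 else 2) = 1 := by
        cases start <;> cases t3f4 <;> simp_all
      simp only [chandB_loop, chandB_splitT, hb, hp, if_true]
      by_cases h1 : total + v = s1
      · rw [if_pos h1, if_pos (show True ∧ total + v = s1 from ⟨trivial, h1⟩)]
        by_cases hbad : s1 = s2 ∧ (sp ++ PySem.Int.toStr v = p1 ∨ sp ++ PySem.Int.toStr v = p2)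
        · rw [if_pos hbad]
          rcases hbad with ⟨he, hq | hq⟩ <;> simp [he, hq]
        · rw [if_neg hbad, ih 0 "" count false]
          have hhead : ¬ (((1 : Int) = 2 ∨ s1 = s2) ∧
              (sp ++ PySem.Int.toStr v = p1 ∨ sp ++ PySem.Int.toStr v = p2)) := by
            rintro ⟨h2 | h2, h3⟩
            · norm_num at h2
            · exact hbad ⟨h2, h3⟩
          simp only [List.any_cons, decide_eq_false hhead, Bool.false_or]
          rfl
      · rw [if_neg h1, if_neg (show ¬ (True ∧ total + v = s1) from fun h => h1 h.2),
          if_neg (by rintro ⟨h, -⟩; norm_num at h : ¬ ((1 : Int) = 2 ∧ total + v = s2))]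
        simpa using ih (total + v) (sp ++ PySem.Int.toStr v) count true
    · have hst : start = false ∧ t3f4 = false := by
        revert hb; cases start <;> cases t3f4 <;> simp
      have hb' : (if start then true else t3f4) = false := by simp [hst.1, hst.2]
      have hp : (if start then (1 : Int) else if t3f4 then 1 else 2) = 2 := by simp [hst.1, hst.2]
      simp only [chandB_loop, chandB_splitT, hb', hp, Bool.false_eq_true, if_true, if_false]
      rw [if_neg (by rintro ⟨h, -⟩; norm_num at h : ¬ ((2 : Int) = 1 ∧ total + v = s1))]
      by_cases h2 : total + v = s2
      · rw [if_pos h2, if_pos (show True ∧ total + v = s2 from ⟨trivial, h2⟩)]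
        by_cases hbad : sp ++ PySem.Int.toStr v = p1 ∨ sp ++ PySem.Int.toStr v = p2
        · rw [if_pos hbad]
          rcases hbad with hq | hq <;> simp [hq]
        · rw [if_neg hbad, ih 0 "" count true]
          have hhead : ¬ ((True ∨ s1 = s2) ∧
              (sp ++ PySem.Int.toStr v = p1 ∨ sp ++ PySem.Int.toStr v = p2)) := fun h => hbad h.2
          simp only [List.any_cons, decide_eq_false hhead, Bool.false_or]
          rfl
      · rw [if_neg h2, if_neg (show ¬ (True ∧ total + v = s2) from fun h => h2 h.2)]
        simpa using ih (total + v) (sp ++ PySem.Int.toStr v) count false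

-- the flat loop (not tsfk) equals split-then-enumerate-then-validate
theorem chandB_loop_splitF (s1 s2 : Int) (p1 p2 : String)
    (flat : List (Int × Bool)) (total : Int) (sp : String) (count : Int) (t3f4 : Bool) :
    chandB_loop s1 s2 p1 p2 false flat total sp count t3f4 =
      !((chandB_enum1 (chandB_splitF s1 s2 flat total sp) (count + 1)).any
          (fun q => decide (((q.1 = 6 ∨ q.1 = 14) ∧ ¬(q.2 = "1111" ∨ q.2 = "121")) ∨
                            ((q.1 = 8 ∨ q.1 = 16) ∧ ¬(q.2 = "22" ∨ q.2 = "112")) ∨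
                            (q.1 % 2 = 1 ∧ (q.2 = p1 ∨ q.2 = p2))))) := by
  induction flat generalizing total sp count t3f4 with
  | nil => simp [chandB_loop, chandB_splitF, chandB_enum1]
  | cons x rest ih =>
    obtain ⟨v, start⟩ := x
    simp only [chandB_loop, chandB_splitF, Bool.false_eq_true, if_false]
    by_cases hm : total + v = s1 ∨ total + v = s2
    · simp only [hm, if_true, chandB_enum1, List.any_cons]
      set sp' := sp ++ PySem.Int.toStr v with hsp
      by_cases b1 : (count + 1 = 6 ∨ count + 1 = 14) ∧ (sp' ≠ "1111" ∧ sp' ≠ "121")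
      · have hh : ((count + 1 = 6 ∨ count + 1 = 14) ∧ ¬(sp' = "1111" ∨ sp' = "121")) ∨
               ((count + 1 = 8 ∨ count + 1 = 16) ∧ ¬(sp' = "22" ∨ sp' = "112")) ∨
               (count + 1) % 2 = 1 ∧ (sp' = p1 ∨ sp' = p2) := Or.inl ⟨b1.1, fun h => h.elim b1.2.1 b1.2.2⟩
        rw [if_pos b1]
        simp only [List.any_cons, decide_eq_true hh, Bool.true_or, Bool.not_true]
      · by_cases b2 : (count + 1 = 8 ∨ count + 1 = 16) ∧ (sp' ≠ "22" ∧ sp' ≠ "112")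
        · have hh : ((count + 1 = 6 ∨ count + 1 = 14) ∧ ¬(sp' = "1111" ∨ sp' = "121")) ∨
                 ((count + 1 = 8 ∨ count + 1 = 16) ∧ ¬(sp' = "22" ∨ sp' = "112")) ∨
                 (count + 1) % 2 = 1 ∧ (sp' = p1 ∨ sp' = p2) := Or.inr (Or.inl ⟨b2.1, fun h => h.elim b2.2.1 b2.2.2⟩)
          rw [if_neg b1, if_pos b2]
          simp only [List.any_cons, decide_eq_true hh, Bool.true_or, Bool.not_true]
        · by_cases b3 : (count + 1) % 2 ≠ 0 ∧ (sp' = p1 ∨ sp' = p2)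
          · have hmod : (count + 1) % 2 = 1 := by omega
            have hh : ((count + 1 = 6 ∨ count + 1 = 14) ∧ ¬(sp' = "1111" ∨ sp' = "121")) ∨
                   ((count + 1 = 8 ∨ count + 1 = 16) ∧ ¬(sp' = "22" ∨ sp' = "112")) ∨
                   (count + 1) % 2 = 1 ∧ (sp' = p1 ∨ sp' = p2) := Or.inr (Or.inr ⟨hmod, b3.2⟩)
            rw [if_neg b1, if_neg b2, if_pos b3]
            simp only [List.any_cons, decide_eq_true hh, Bool.true_or, Bool.not_true]
          · have hnot : ¬ (((count + 1 = 6 ∨ count + 1 = 14) ∧ ¬(sp' = "1111" ∨ sp' = "121")) ∨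
                   ((count + 1 = 8 ∨ count + 1 = 16) ∧ ¬(sp' = "22" ∨ sp' = "112")) ∨
                   (count + 1) % 2 = 1 ∧ (sp' = p1 ∨ sp' = p2)) := by
              rintro (⟨ha, hc⟩ | ⟨ha, hc⟩ | ⟨ha, hc⟩)
              · exact b1 ⟨ha, fun h => hc (Or.inl h), fun h => hc (Or.inr h)⟩
              · exact b2 ⟨ha, fun h => hc (Or.inl h), fun h => hc (Or.inr h)⟩
              · exact b3 ⟨by omega, hc⟩
            rw [if_neg b1, if_neg b2, if_neg b3,
              ih 0 "" (count + 1) (if start then true else t3f4)]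
            simp only [List.any_cons, decide_eq_false hnot, Bool.false_or]
    · rw [if_neg hm, if_neg hm]
      exact ih (total + v) (sp ++ PySem.Int.toStr v) count (if start then true else t3f4)

-- ===== VERDICT (by name: the statement is the Claim_ definition above) =====
theorem chandassuCondition_spec : Claim_equal_chandassuCondition := by
  intro lg s1 s2 p1 p2 eg ts _
  unfold Spec_chandassuCondition chandassuCondition chandassuCondition_alt
  by_cases h1 : p1 = ""
  · simp [h1]
  · by_cases h2 : p2 = ""
    · simp [h2]
    · rw [if_pos ⟨h1, h2⟩, if_neg (by tauto : ¬ (p1 = "" ∨ p2 = ""))]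
      have hA := (chandB_flat_outer s1 s2 p1 p2 eg ts lg 0 0 [] "" true).symm
      simp only [List.sum_nil] at hA
      rw [hA]
      cases ts with
      | true => simpa using chandB_loop_splitT s1 s2 p1 p2 (chandB_flat eg lg 0) 0 "" 0 true
      | false => simpa using chandB_loop_splitF s1 s2 p1 p2 (chandB_flat eg lg 0) 0 "" 0 true
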